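-- pv_equiv track=rewrite | github.com/andrewtamagni/azure-domain-services | stack_menu.py | hub_shape_free_config_path
-- ===== SOURCE A (Python) =====
-- def hub_shape_free_config_path(path: str, project: str) -> bool:
--     """
--     True for paths under hub route_tables / hub_nsg_rules. Real stacks often have a different
--     number or order of routes and NSG rules than Pulumi.sample.yaml (e.g. one spoke vs two in
--     the sample); positional comparison to the sample would produce false INCOMPLETE results.
--     """
--     if project != "azure-pa-hub-network":
--         return False
--     for suffix in (":route_tables", ":hub_nsg_rules"):
--         key = f"{project}{suffix}"
--         if path == key or path.startswith(f"{key}/"):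
--             return True
--     return False
-- ===== SOURCE B (Python) =====
-- def hub_shape_free_config_path(path: str, project: str) -> bool:
--     if project != "azure-pa-hub-network":
--         return False
--     if not path.startswith(project + ":"):
--         return False
--     seg = path[len(project) + 1:].split("/", 1)[0]
--     return seg in {"route_tables", "hub_nsg_rules"}
-- ===== Notes on version B (the rewrite author's own statement) =====
-- stated objective: idiomatic
-- what changed: Instead of looping over the two suffixes building candidate keys and prefix-matching each, B checks path starts with 'project:' once, extracts the first path segment after the colon with split('/', 1)[0], and tests set membership of that segment.
import Mathlib
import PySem

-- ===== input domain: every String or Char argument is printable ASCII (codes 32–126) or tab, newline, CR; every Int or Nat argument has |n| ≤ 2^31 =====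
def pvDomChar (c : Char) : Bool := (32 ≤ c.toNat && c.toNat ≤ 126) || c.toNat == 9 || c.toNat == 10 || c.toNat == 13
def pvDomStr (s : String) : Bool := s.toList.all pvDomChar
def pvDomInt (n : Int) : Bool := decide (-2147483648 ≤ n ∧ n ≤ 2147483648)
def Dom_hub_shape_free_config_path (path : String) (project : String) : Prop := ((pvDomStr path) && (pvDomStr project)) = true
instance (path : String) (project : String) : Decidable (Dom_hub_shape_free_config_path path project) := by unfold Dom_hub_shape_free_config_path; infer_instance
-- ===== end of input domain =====

-- B replaces A's loop over suffix keys by parsing the first path segment after "project:" and one set-membership test (idiomatic decomposition, same cost).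

-- ===== PORT A =====
def hub_shape_free_config_path (path : String) (project : String) : Bool :=
  if project != "azure-pa-hub-network" then false
  else
    -- for suffix in (":route_tables", ":hub_nsg_rules"): early-returning loop = List.any
    [":route_tables", ":hub_nsg_rules"].any (fun suffix =>
      let key := project ++ suffix
      path == key || PySem.Str.startswith path (key ++ "/"))

-- ===== PORT B =====
def hub_shape_free_config_path_alt (path : String) (project : String) : Bool :=
  if project != "azure-pa-hub-network" then false
  else if !(PySem.Str.startswith path (project ++ ":")) then false
  else
    let seg := ((PySem.Str.splitMax? (PySem.Str.slice path (some (PySem.Str.len project + 1)) none) "/" 1).getD []).headD ""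
    seg == "route_tables" || seg == "hub_nsg_rules"

-- ===== PRECONDITION & SPEC =====
def Spec_hub_shape_free_config_path (path : String) (project : String) (out : Bool) : Prop := out = hub_shape_free_config_path_alt path project
instance (path : String) (project : String) (out : Bool) : Decidable (Spec_hub_shape_free_config_path path project out) := by unfold Spec_hub_shape_free_config_path; infer_instance

-- ===== CLAIM (what is proved, stated in full; the proofs are below) =====
def Claim_equal_hub_shape_free_config_path : Prop := ∀ (path : String) (project : String), Dom_hub_shape_free_config_path path project → Spec_hub_shape_free_config_path path project (hub_shape_free_config_path path project)

-- ===== LEMMAS AND PROOFS =====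

-- With maxsplit exhausted (m = 0), go yields exactly one more piece in front of acc.
lemma go_zero (fuel : Nat) (l cur : List Char) (acc : List (List Char)) :
    ∃ x, PySem.Chars.splitOnMax.go ['/'] fuel 0 l cur acc = (x :: acc).reverse := by
  cases fuel with
  | zero => exact ⟨cur.reverse ++ l, by rw [PySem.Chars.splitOnMax.go]⟩
  | succ fuel =>
    cases l with
    | nil => exact ⟨cur.reverse, by rw [PySem.Chars.splitOnMax.go]; simp⟩
    | cons c rest =>
      exact ⟨cur.reverse ++ (c :: rest), by rw [PySem.Chars.splitOnMax.go]; simp⟩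

-- With maxsplit 1, the first piece is cur.reverse ++ (chars of l before the first '/').
lemma go_one (fuel : Nat) (l cur : List Char) (h : l.length ≤ fuel) :
    ∃ t, PySem.Chars.splitOnMax.go ['/'] fuel 1 l cur [] =
      (cur.reverse ++ l.takeWhile (· ≠ '/')) :: t := by
  induction fuel generalizing l cur with
  | zero =>
    have hl : l = [] := List.eq_nil_of_length_eq_zero (Nat.le_zero.mp h)
    subst hl
    exact ⟨[], by rw [PySem.Chars.splitOnMax.go]; simp⟩
  | succ fuel ih =>
    cases l with
    | nil => exact ⟨[], by rw [PySem.Chars.splitOnMax.go]; simp; all_goals omega⟩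
    | cons c rest =>
      by_cases hc : c = '/'
      · subst hc
        obtain ⟨x, hx⟩ := go_zero fuel rest [] [cur.reverse]
        refine ⟨[x], ?_⟩
        rw [PySem.Chars.splitOnMax.go]
        simp [List.isPrefixOf, hx, List.takeWhile]
      · obtain ⟨t, ht⟩ := ih rest (c :: cur) (by simpa using Nat.le_of_succ_le_succ h)
        refine ⟨t, ?_⟩
        rw [PySem.Chars.splitOnMax.go]
        simp [List.isPrefixOf, Ne.symm hc, ht, List.takeWhile, hc]

lemma splitOnMax_one_head (r : List Char) :
    ∃ t, PySem.Chars.splitOnMax r ['/'] 1 = (r.takeWhile (· ≠ '/')) :: t := by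
  obtain ⟨t, ht⟩ := go_one (r.length + 1) r [] (by omega)
  exact ⟨t, by simpa [PySem.Chars.splitOnMax] using ht⟩

-- first segment = w  ↔  r is exactly w or starts with "w/"  (for w without '/')
lemma seg_iff (r w : List Char) (hw : '/' ∉ w) :
    r.takeWhile (· ≠ '/') = w ↔ (r = w ∨ w ++ ['/'] <+: r) := by
  induction r generalizing w with
  | nil =>
    simp only [List.takeWhile_nil]
    constructor
    · rintro rfl; exact Or.inl rfl
    · rintro (rfl | ⟨t, ht⟩)
      · rfl
      · exact absurd ht (by simp)
  | cons c rest ih =>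
    by_cases hc : c = '/'
    · subst hc
      rw [show List.takeWhile (· ≠ '/') ('/' :: rest) = [] by simp [List.takeWhile]]
      constructor
      · rintro rfl
        exact Or.inr ⟨rest, rfl⟩
      · rintro (rfl | hpre)
        · exact absurd (List.mem_cons_self) hw
        · cases w with
          | nil => rfl
          | cons d w' =>
            have := (List.cons_prefix_cons.mp hpre).1
            exact absurd (this ▸ List.mem_cons_self) hw
    · rw [show List.takeWhile (· ≠ '/') (c :: rest) = c :: List.takeWhile (· ≠ '/') rest by
        simp [List.takeWhile, hc]]
      cases w with
      | nil =>
        simp only [List.nil_append]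
        constructor
        · intro h; exact absurd h (by simp)
        · rintro (h | hpre)
          · exact absurd h (by simp)
          · exact absurd (List.cons_prefix_cons.mp hpre).1 (Ne.symm hc)
      | cons d w' =>
        have hw' : '/' ∉ w' := fun h => hw (List.mem_cons_of_mem _ h)
        rw [List.cons_eq_cons, List.cons_eq_cons, List.cons_append, List.cons_prefix_cons,
          ih w' hw']
        tauto

-- ===== VERDICT (by name: the statement is the Claim_ definition above) =====
theorem hub_shape_free_config_path_spec : Claim_equal_hub_shape_free_config_path := by
  intro path project _
  unfold Spec_hub_shape_free_config_path hub_shape_free_config_path hub_shape_free_config_path_alt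
  by_cases hp : project = "azure-pa-hub-network"
  case neg => simp [bne, hp]
  subst hp
  simp only [bne_self_eq_false, Bool.false_eq_true, if_false]
  by_cases hq : ("azure-pa-hub-network" ++ ":").toList <+: path.toList
  case neg =>
    -- B's guard is false, and every candidate key of A extends "project:", so A is false too.
    have hguard : PySem.Str.startswith path ("azure-pa-hub-network" ++ ":") = false := by
      rw [← Bool.not_eq_true, PySem.Str.startswith_eq, PySem.Chars.startswith_iff]
      exact hq
    rw [hguard]
    show _ = false
    simp only [List.any_cons, List.any_nil, Bool.or_false, Bool.or_eq_false_iff]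
    refine ⟨⟨?_, ?_⟩, ?_, ?_⟩
    · rw [beq_eq_false_iff_ne]
      rintro rfl
      exact hq ⟨"route_tables".toList, by decide⟩
    · rw [← Bool.not_eq_true, PySem.Str.startswith_eq, PySem.Chars.startswith_iff]
      intro h
      rw [show ("azure-pa-hub-network" ++ ":route_tables" ++ "/").toList
            = ("azure-pa-hub-network" ++ ":").toList ++ ("route_tables".toList ++ ['/']) by decide] at h
      exact hq ((List.prefix_append _ _).trans h)
    · rw [beq_eq_false_iff_ne]
      rintro rfl
      exact hq ⟨"hub_nsg_rules".toList, by decide⟩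
    · rw [← Bool.not_eq_true, PySem.Str.startswith_eq, PySem.Chars.startswith_iff]
      intro h
      rw [show ("azure-pa-hub-network" ++ ":hub_nsg_rules" ++ "/").toList
            = ("azure-pa-hub-network" ++ ":").toList ++ ("hub_nsg_rules".toList ++ ['/']) by decide] at h
      exact hq ((List.prefix_append _ _).trans h)
  case pos =>
    obtain ⟨r, hr⟩ := hq
    have hguard : PySem.Str.startswith path ("azure-pa-hub-network" ++ ":") = true := by
      rw [PySem.Str.startswith_eq, PySem.Chars.startswith_iff]
      exact ⟨r, hr⟩
    rw [hguard]
    simp only [Bool.not_true, Bool.false_eq_true, if_false]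
    -- the slice after the colon is exactly r
    have hslice : (PySem.Str.slice path (some (PySem.Str.len "azure-pa-hub-network" + 1)) none).toList = r := by
      rw [PySem.Str.toList_slice, PySem.Chars.slice_eq_listSlice,
        show PySem.Str.len "azure-pa-hub-network" + 1 = ((21 : Nat) : Int) by decide,
        PySem.List.slice_from_natCast, ← hr,
        show (21 : Nat) = ("azure-pa-hub-network" ++ ":").toList.length by decide,
        List.drop_left]
    -- the first segment of r
    obtain ⟨t, ht⟩ := splitOnMax_one_head r
    have hseg : ((PySem.Str.splitMax? (PySem.Str.slice path (some (PySem.Str.len "azure-pa-hub-network" + 1)) none) "/" 1).getD []).headD ""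
        = String.ofList (r.takeWhile (· ≠ '/')) := by
      unfold PySem.Str.splitMax? PySem.Chars.splitMax?
      rw [show ("/" : String).toList = ['/'] from rfl, hslice]
      simp [ht]
    simp only [hseg]
    rw [Bool.eq_iff_iff]
    simp only [List.any_cons, List.any_nil, Bool.or_false, Bool.or_eq_true, beq_iff_eq]
    have hofList : ∀ w : String, String.ofList (r.takeWhile (· ≠ '/')) = w ↔ r.takeWhile (· ≠ '/') = w.toList := by
      intro w
      constructor
      · intro h; rw [← h]; simp
      · intro h; rw [h]; simp
    have key1 : path = "azure-pa-hub-network" ++ ":route_tables" ↔ r = "route_tables".toList := by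
      rw [← String.toList_inj, ← hr,
        show ("azure-pa-hub-network" ++ ":route_tables").toList
          = ("azure-pa-hub-network" ++ ":").toList ++ "route_tables".toList by decide]
      simp
    have key2 : path = "azure-pa-hub-network" ++ ":hub_nsg_rules" ↔ r = "hub_nsg_rules".toList := by
      rw [← String.toList_inj, ← hr,
        show ("azure-pa-hub-network" ++ ":hub_nsg_rules").toList
          = ("azure-pa-hub-network" ++ ":").toList ++ "hub_nsg_rules".toList by decide]
      simp
    have pre1 : PySem.Str.startswith path ("azure-pa-hub-network" ++ ":route_tables" ++ "/") = true
        ↔ "route_tables".toList ++ ['/'] <+: r := by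
      rw [PySem.Str.startswith_eq, PySem.Chars.startswith_iff, ← hr,
        show ("azure-pa-hub-network" ++ ":route_tables" ++ "/").toList
          = ("azure-pa-hub-network" ++ ":").toList ++ ("route_tables".toList ++ ['/']) by decide]
      simp
    have pre2 : PySem.Str.startswith path ("azure-pa-hub-network" ++ ":hub_nsg_rules" ++ "/") = true
        ↔ "hub_nsg_rules".toList ++ ['/'] <+: r := by
      rw [PySem.Str.startswith_eq, PySem.Chars.startswith_iff, ← hr,
        show ("azure-pa-hub-network" ++ ":hub_nsg_rules" ++ "/").toList
          = ("azure-pa-hub-network" ++ ":").toList ++ ("hub_nsg_rules".toList ++ ['/']) by decide]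
      simp
    rw [key1, key2, pre1, pre2, hofList, hofList,
      seg_iff r "route_tables".toList (by decide), seg_iff r "hub_nsg_rules".toList (by decide)]
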